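-- pv_equiv track=rewrite | github.com/Sca123456789/tornado-be-python-2024 | lesson_day_08/excercise_2/test_version.py | get_latest_day
-- ===== SOURCE A (Python) =====
-- def get_latest_day(dates):
--     day_dict = {}
--     for date in dates:
--         day = date.split(' ')[0]
--         if day in day_dict:
--             day_dict[day] += 1
--         else:
--             day_dict[day] = 1
--     return day_dict
-- ===== SOURCE B (Python) =====
-- def get_latest_day(dates):
--     days = [date.split(' ')[0] for date in dates]
--     seen = []
--     for day in days:
--         if day not in seen:
--             seen.append(day)
--     return {day: days.count(day) for day in seen}
-- ===== Notes on version B (the rewrite author's own statement) =====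
-- stated objective: alternative
-- what changed: Replaces the single-pass dict-increment loop with a two-phase tally: extract all day keys, deduplicate them in first-occurrence order, then count each distinct key with list.count (trades A's O(n) hash counting for O(n*k) list scans).
import Mathlib
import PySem

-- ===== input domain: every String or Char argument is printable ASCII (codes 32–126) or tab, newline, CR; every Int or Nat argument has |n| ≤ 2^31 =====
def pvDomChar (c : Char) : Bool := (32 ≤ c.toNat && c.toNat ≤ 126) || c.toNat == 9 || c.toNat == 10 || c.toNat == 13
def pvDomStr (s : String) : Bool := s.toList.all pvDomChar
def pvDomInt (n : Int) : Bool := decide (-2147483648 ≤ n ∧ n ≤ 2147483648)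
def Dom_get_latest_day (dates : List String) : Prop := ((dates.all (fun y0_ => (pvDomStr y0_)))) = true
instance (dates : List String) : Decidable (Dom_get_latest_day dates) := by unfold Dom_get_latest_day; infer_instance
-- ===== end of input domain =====

-- B replaces A's one-pass dict-increment counting by extract-keys / dedup / count-per-key; alternative decomposition, not faster.


-- ===== PORT A =====
-- date.split(' ')[0]; split with a separator always yields a nonempty list, so index 0 never raises
def pvDayOf (date : String) : String :=
  (PySem.List.pyGet? ((PySem.Str.split? date " ").getD []) 0).getD ""

def get_latest_day (dates : List String) : List (String × Int) :=
  (dates.foldl (fun day_dict date =>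
      let day := pvDayOf date
      if day_dict.contains day then
        day_dict.insert day (day_dict.getD day 0 + 1)
      else
        day_dict.insert day 1)
    PySem.Dict.empty).items

-- ===== PORT B =====
def get_latest_day_alt (dates : List String) : List (String × Int) :=
  let days := dates.map pvDayOf
  let seen := days.foldl (fun seen day => if seen.contains day then seen else seen ++ [day]) []
  seen.map (fun day => (day, (days.count day : Int)))

-- ===== PRECONDITION & SPEC =====
def Spec_get_latest_day (dates : List String) (out : List (String × Int)) : Prop := out = get_latest_day_alt dates
instance (dates : List String) (out : List (String × Int)) : Decidable (Spec_get_latest_day dates out) := by unfold Spec_get_latest_day; infer_instance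

-- ===== CLAIM (what is proved, stated in full; the proofs are below) =====
def Claim_equal_get_latest_day : Prop := ∀ (dates : List String), Dom_get_latest_day dates → Spec_get_latest_day dates (get_latest_day dates)

-- ===== LEMMAS AND PROOFS =====

-- A's branching fold step is the insert-increment counter step
theorem pv_step_eq :
    (fun (d : PySem.Dict String Int) (day : String) =>
        if d.contains day then d.insert day (d.getD day 0 + 1) else d.insert day 1)
    = (fun (d : PySem.Dict String Int) (day : String) => d.insert day (d.getD day 0 + 1)) := by
  funext d day
  by_cases h : d.contains day = true
  · simp [h]
  · have h0 : d.get? day = none := (PySem.Dict.get?_eq_none_iff_contains d day).mpr (by simpa using h)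
    simp [h, PySem.Dict.getD, h0]

-- ===== VERDICT (by name: the statement is the Claim_ definition above) =====
theorem get_latest_day_spec : Claim_equal_get_latest_day := by
  intro dates _
  show get_latest_day dates = get_latest_day_alt dates
  unfold get_latest_day get_latest_day_alt
  rw [show (fun (day_dict : PySem.Dict String Int) (date : String) =>
        let day := pvDayOf date
        if day_dict.contains day then day_dict.insert day (day_dict.getD day 0 + 1)
        else day_dict.insert day 1)
      = (fun d date => d.insert (pvDayOf date) (d.getD (pvDayOf date) 0 + 1)) from
        funext fun d => funext fun date => congrFun (congrFun pv_step_eq d) (pvDayOf date)]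
  rw [show List.foldl (fun (d : PySem.Dict String Int) date => d.insert (pvDayOf date) (d.getD (pvDayOf date) 0 + 1)) PySem.Dict.empty dates
      = List.foldl (fun d day => d.insert day (d.getD day 0 + 1)) PySem.Dict.empty (dates.map pvDayOf) from
        (List.foldl_map (f := pvDayOf)
          (g := fun (d : PySem.Dict String Int) day => d.insert day (d.getD day 0 + 1))
          (l := dates) (init := PySem.Dict.empty)).symm,
    PySem.Dict.foldl_insert_getD_add_one_eq_counter,
    PySem.Dict.items_counter]
  rfl
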